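-- pv_equiv track=rewrite | github.com/epser93/Algorithm-Coding-Test | Programmers/위클리 챌린지/4주차_직업군 추천하기.py | solution
-- ===== SOURCE A (Python) =====
-- def solution(table, languages, preference):
--     language_table = {}
--     result = []
--     max_point = float('-inf')
--     for elm in table:
--         elm = elm.split(" ")
--         company, language = elm[0], elm[1:]
--         language_table[company] = language
--     for company, language_list in language_table.items():
--         point = 0
--         for idx, language in enumerate(languages):
--             if language in language_list:
--                 point += (5 - language_list.index(language)) * preference[idx]
--         if point > max_point:
--             max_point = point
--             result = [company]
--         elif point == max_point:
--             max_point = point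
--             result.append(company)
--     return sorted(result)[0]
-- ===== SOURCE B (Python) =====
-- def solution(table, languages, preference):
--     # aggregate the preference weight of each language once
--     pref = {}
--     for lang, p in zip(languages, preference):
--         pref[lang] = pref.get(lang, 0) + p
--
--     def score(langs):
--         # one pass over the company's own language list; only the first
--         # occurrence of a language counts (that is what .index would pick)
--         seen = set()
--         total = 0
--         for j, lang in enumerate(langs):
--             if lang not in seen:
--                 seen.add(lang)
--                 total += (5 - j) * pref.get(lang, 0)
--         return total
--
--     jobs = {}
--     for row in table:
--         parts = row.split(" ")
--         jobs[parts[0]] = parts[1:]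
--     return min(((c, score(l)) for c, l in jobs.items()), key=lambda s: (-s[1], s[0]))[0]
-- ===== Notes on version B (the rewrite author's own statement) =====
-- stated objective: faster
-- what changed: B inverts the scoring: it aggregates preference weights per language into one dict built from zip(languages, preference), then scores each company in a single pass over the company's own language row (a seen-set keeps only first occurrences, replacing A's per-language membership test plus .index scan over the row), and picks the answer in one min(key=(-score, name)) step instead of A's running max_point/tie-list bookkeeping plus final sort. …
-- outside the precondition, e.g. on solution(['a x', 'a y'], ['x'], []): A returns 'a', B returns 'a'
import Mathlib
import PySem

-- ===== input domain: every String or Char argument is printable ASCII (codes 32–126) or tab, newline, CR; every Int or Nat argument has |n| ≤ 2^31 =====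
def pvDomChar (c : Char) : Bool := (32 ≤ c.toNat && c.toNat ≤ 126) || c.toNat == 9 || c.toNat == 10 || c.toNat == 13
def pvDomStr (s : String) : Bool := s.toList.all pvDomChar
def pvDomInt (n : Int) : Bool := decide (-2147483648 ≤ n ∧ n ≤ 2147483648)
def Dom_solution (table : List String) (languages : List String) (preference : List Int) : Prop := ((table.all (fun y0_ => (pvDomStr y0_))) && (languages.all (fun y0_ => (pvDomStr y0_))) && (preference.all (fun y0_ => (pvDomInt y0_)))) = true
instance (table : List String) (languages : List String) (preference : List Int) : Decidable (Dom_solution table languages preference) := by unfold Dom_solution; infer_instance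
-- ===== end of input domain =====

-- B inverts A's scoring: it aggregates the preference weight of every language into one dict,
-- then scores each company in a single pass over the company's OWN language row (a seen-set keeps
-- only first occurrences), instead of A's scan of `languages` with a membership test and an
-- .index scan per entry; the answer is picked with min(key=(-score, name)) instead of A's running
-- max_point/tie-list bookkeeping plus final sort. Same return value, no observable side effects.

-- ===== PORT A =====
-- row.split(" "): separator is nonempty, so split? never returns none; .getD [] is exact
def pvSplitRow (row : String) : List String := (PySem.Str.split? row " ").getD []

-- 'elm = elm.split(" "); language_table[elm[0]] = elm[1:]' — split(" ") is always nonempty, so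
-- elm[0] never raises and headD "" is exact (both Pythons build this dict with the same loop)
def pvInsertRow (d : PySem.Dict String (List String)) (row : String) : PySem.Dict String (List String) :=
  let elm := pvSplitRow row
  d.insert (elm.headD "") elm.tail

-- A's inner scoring loop: for idx, language in enumerate(languages): if language in language_list:
--   point += (5 - language_list.index(language)) * preference[idx]
-- list.index is guarded by the membership test, so .getD 0 is exact; preference[idx] is guarded by
-- Pre_solution (no out-of-range idx ever reaches it), so pyGetD is exact there
def pvPointA (languages : List String) (preference : List Int) (L : List String) : Int :=
  (PySem.List.enumerate languages).foldl (fun point il =>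
    if il.2 ∈ L then
      point + (5 - (((PySem.List.index? L il.2).getD 0 : Nat) : Int)) * PySem.List.pyGetD preference il.1 0
    else point) 0

def solution (table : List String) (languages : List String) (preference : List Int) : String :=
  let languageTable := table.foldl pvInsertRow PySem.Dict.empty
  -- max_point = float('-inf') is modelled as none: every int compares greater and none equals it
  let final := languageTable.items.foldl (fun (st : Option Int × List String) cl =>
      let point := pvPointA languages preference cl.2
      match st.1 with
      | none => (some point, [cl.1])
      | some m =>
        if m < point then (some point, [cl.1])
        else if point = m then (some point, st.2 ++ [cl.1])
        else st) ((none : Option Int), ([] : List String))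
  -- sorted(result)[0]: result is nonempty under Pre_solution (table ≠ []), so headD "" is exact
  (PySem.List.sorted final.2 (fun x => x) false).headD ""

-- ===== PORT B =====
-- pref = {}; for lang, p in zip(languages, preference): pref[lang] = pref.get(lang, 0) + p
def pvPrefDict (languages : List String) (preference : List Int) : PySem.Dict String Int :=
  (languages.zip preference).foldl (fun d lp => d.insert lp.1 (d.getD lp.1 0 + lp.2)) PySem.Dict.empty

-- body of B's `score` loop: if lang not in seen: seen.add(lang); total += (5 - j) * pref.get(lang, 0)
def pvScoreStep (pref : PySem.Dict String Int) (st : PySem.Set String × Int) (jl : Int × String) :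
    PySem.Set String × Int :=
  if jl.2 ∈ st.1 then st
  else (PySem.Set.add st.1 jl.2, st.2 + (5 - jl.1) * pref.getD jl.2 0)

-- score(langs): one pass over the row with a seen-set keeping first occurrences only
def pvPointB (pref : PySem.Dict String Int) (L : List String) : Int :=
  ((PySem.List.enumerate L).foldl (pvScoreStep pref) ((PySem.Set.empty : PySem.Set String), 0)).2

def solution_alt (table : List String) (languages : List String) (preference : List Int) : String :=
  let pref := pvPrefDict languages preference
  let jobs := table.foldl pvInsertRow PySem.Dict.empty
  -- min((c, score(l)) …, key=lambda s: (-s[1], s[0]))[0]; jobs nonempty under Pre_solution, getD exact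
  ((PySem.List.min2? (jobs.items.map (fun cl => (cl.1, pvPointB pref cl.2)))
      (fun s => -s.2) (fun s => s.1)).getD ("", 0)).1

-- ===== PRECONDITION & SPEC =====
-- Pre_ excludes exactly the inputs where A raises: an empty table (sorted([])[0] IndexError) and
-- inputs where a language whose index has no preference entry occurs in some row's language list
-- (preference[idx] IndexError); the per-row check is slightly conservative when a duplicated
-- company name overwrites such a row (there A returns and B returns the same value).
def Pre_solution (table : List String) (languages : List String) (preference : List Int) : Prop :=
  table ≠ [] ∧
  ∀ lang ∈ languages.drop preference.length, ∀ row ∈ table, lang ∉ (pvSplitRow row).tail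
instance (table : List String) (languages : List String) (preference : List Int) : Decidable (Pre_solution table languages preference) := by unfold Pre_solution; infer_instance

def pvWitness_solution : List String × List String × List Int :=
  (["jobA python cpp java", "jobB java ruby"], ["python", "ruby"], [5, 3])

def Spec_solution (table : List String) (languages : List String) (preference : List Int) (out : String) : Prop := out = solution_alt table languages preference
instance (table : List String) (languages : List String) (preference : List Int) (out : String) : Decidable (Spec_solution table languages preference out) := by unfold Spec_solution; infer_instance

-- ===== CLAIM (what is proved, stated in full; the proofs are below) =====
def Claim_equal_solution : Prop := ∀ (table : List String) (languages : List String) (preference : List Int), Dom_solution table languages preference → Pre_solution table languages preference → Spec_solution table languages preference (solution table languages preference)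

-- ===== LEMMAS AND PROOFS =====

-- A's selection step, on an already-scored pair
def pvStepA (st : Option Int × List String) (cp : String × Int) : Option Int × List String :=
  match st.1 with
  | none => (some cp.2, [cp.1])
  | some m =>
    if m < cp.2 then (some cp.2, [cp.1])
    else if cp.2 = m then (some cp.2, st.2 ++ [cp.1])
    else st

-- min2?'s step for key (-score, name)
def pvStepM (acc : Option (String × Int)) (x : String × Int) : Option (String × Int) :=
  match acc with
  | none => some x
  | some m =>
    if (decide ((-x.2) < (-m.2)) || (!decide ((-m.2) < (-x.2)) && decide (x.1 < m.1))) then some x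
    else some m

lemma pvMin2_eq_foldl (xs : List (String × Int)) :
    PySem.List.min2? xs (fun s => -s.2) (fun s => s.1) = xs.foldl pvStepM none := by
  unfold PySem.List.min2?
  congr 1
  funext acc x
  cases acc with
  | none => rfl
  | some m => simp only [pvStepM]

-- coupling invariant between A's (max, ties) state and min2?'s best-so-far
def pvInv (st : Option Int × List String) (acc : Option (String × Int)) : Prop :=
  match st.1, acc with
  | none, none => st.2 = []
  | some m, some b => b.2 = m ∧ b.1 ∈ st.2 ∧ (∀ x ∈ st.2, b.1 ≤ x)
  | _, _ => False

lemma pvInv_step (st : Option Int × List String) (acc : Option (String × Int)) (x : String × Int)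
    (h : pvInv st acc) : pvInv (pvStepA st x) (pvStepM acc x) := by
  rcases st with ⟨mo, res⟩
  cases mo with
  | none =>
      cases acc with
      | none =>
          have hres : res = [] := h
          subst hres
          show pvInv (some x.2, [x.1]) (some x)
          refine ⟨rfl, List.mem_cons_self, ?_⟩
          intro y hy
          rw [List.mem_singleton] at hy
          exact hy ▸ le_refl x.1
      | some b => exact absurd h (by simp [pvInv])
  | some m =>
      cases acc with
      | none => exact absurd h (by simp [pvInv])
      | some b =>
          obtain ⟨hb2, hbmem, hble⟩ : b.2 = m ∧ b.1 ∈ res ∧ (∀ y ∈ res, b.1 ≤ y) := h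
          by_cases hmp : m < x.2
          · have hM : pvStepM (some b) x = some x := by
              have h1 : (-x.2) < (-b.2) := by omega
              simp [pvStepM, h1]
            have hA : pvStepA (some m, res) x = (some x.2, [x.1]) := by
              simp [pvStepA, hmp]
            rw [hA, hM]
            refine ⟨rfl, List.mem_cons_self, ?_⟩
            intro y hy
            rw [List.mem_singleton] at hy
            exact hy ▸ le_refl x.1
          · by_cases hpm : x.2 = m
            · have h1 : ¬ ((-x.2) < (-b.2)) := by omega
              have h2 : ¬ ((-b.2) < (-x.2)) := by omega
              have hA : pvStepA (some m, res) x = (some x.2, res ++ [x.1]) := by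
                simp [pvStepA, hpm]
              by_cases hc : x.1 < b.1
              · have hM : pvStepM (some b) x = some x := by
                  simp [pvStepM, h1, h2, hc]
                rw [hA, hM]
                refine ⟨rfl, List.mem_append_right _ List.mem_cons_self, ?_⟩
                intro y hy
                rcases List.mem_append.mp hy with hy | hy
                · exact le_trans (le_of_lt hc) (hble y hy)
                · simp at hy; simp [hy]
              · have hM : pvStepM (some b) x = some b := by
                  simp [pvStepM, h1, h2, hc]
                rw [hA, hM]
                refine ⟨by rw [hb2, hpm], List.mem_append_left _ hbmem, ?_⟩
                intro y hy
                rcases List.mem_append.mp hy with hy | hy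
                · exact hble y hy
                · simp at hy; rw [hy]; exact le_of_not_gt hc
            · have hlt : x.2 < m := lt_of_le_of_ne (le_of_not_gt hmp) hpm
              have h1 : ¬ ((-x.2) < (-b.2)) := by omega
              have h2 : (-b.2) < (-x.2) := by omega
              have hM : pvStepM (some b) x = some b := by
                simp [pvStepM, h1, h2]
              have hA : pvStepA (some m, res) x = (some m, res) := by
                simp [pvStepA, hmp, hpm]
              rw [hA, hM]
              exact ⟨hb2, hbmem, hble⟩

lemma pvInv_foldl (l : List (String × Int)) :
    ∀ (st : Option Int × List String) (acc : Option (String × Int)),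
      pvInv st acc → pvInv (l.foldl pvStepA st) (l.foldl pvStepM acc) := by
  induction l with
  | nil => intro st acc h; exact h
  | cons x t ih => intro st acc h; exact ih _ _ (pvInv_step st acc x h)

lemma pvFoldM_some (l : List (String × Int)) :
    ∀ (b : String × Int), ∃ c, l.foldl pvStepM (some b) = some c := by
  induction l with
  | nil => intro b; exact ⟨b, rfl⟩
  | cons x t ih =>
      intro b
      show ∃ c, t.foldl pvStepM (pvStepM (some b) x) = some c
      have hcases : pvStepM (some b) x = some x ∨ pvStepM (some b) x = some b := by
        simp only [pvStepM]
        split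
        · exact Or.inl rfl
        · exact Or.inr rfl
      rcases hcases with hx | hx <;> rw [hx] <;> exact ih _

-- the heart of the selection equivalence: A's sorted-tie-list head equals B's min-by-(-score, name)
lemma pvSelection (pairs : List (String × Int)) (h : pairs ≠ []) :
    (PySem.List.sorted (pairs.foldl pvStepA ((none : Option Int), ([] : List String))).2
        (fun x => x) false).headD ""
    = ((pairs.foldl pvStepM none).getD ("", 0)).1 := by
  obtain ⟨x, t, rfl⟩ := List.exists_cons_of_ne_nil h
  have hinv := pvInv_foldl (x :: t) ((none : Option Int), ([] : List String)) none (by simp [pvInv])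
  obtain ⟨b, hb⟩ : ∃ c, (x :: t).foldl pvStepM none = some c := pvFoldM_some t x
  rw [hb] at hinv ⊢
  rcases hA : (x :: t).foldl pvStepA ((none : Option Int), ([] : List String)) with ⟨mo, res⟩
  rw [hA] at hinv
  cases mo with
  | none => exact absurd hinv (by simp [pvInv])
  | some m =>
      obtain ⟨hb2, hbmem, hble⟩ : b.2 = m ∧ b.1 ∈ res ∧ (∀ y ∈ res, b.1 ≤ y) := hinv
      rcases hs : PySem.List.sorted res (fun x => x) false with _ | ⟨s0, rest⟩
      · rw [(PySem.List.sorted_eq_nil_iff res (fun x => x) false).mp hs] at hbmem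
        exact absurd hbmem (List.not_mem_nil)
      · have hs0mem : s0 ∈ res := by
          have hperm := (PySem.List.sorted_perm res (fun x => x) false).mem_iff (a := s0)
          rw [hs] at hperm
          exact hperm.mp List.mem_cons_self
        have hle1 : s0 ≤ b.1 := PySem.List.key_head_sorted_le res (fun x => x) hs b.1 hbmem
        have hle2 : b.1 ≤ s0 := hble s0 hs0mem
        simpa using le_antisymm hle1 hle2

-- every value stored in the parsed table is the tail of some row's split
lemma pvBuild_vals (table : List String) :
    ∀ (d : PySem.Dict String (List String)), ∀ p ∈ (table.foldl pvInsertRow d).items,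
      p ∈ d.items ∨ ∃ row ∈ table, p.2 = (pvSplitRow row).tail := by
  induction table with
  | nil => intro d p hp; exact Or.inl hp
  | cons r t ih =>
      intro d p hp
      rcases ih (pvInsertRow d r) p hp with hin | ⟨row, hrow, hval⟩
      · rcases (PySem.Dict.mem_items_insert d _ _ p).mp hin with he | ⟨hd, _⟩
        · exact Or.inr ⟨r, List.mem_cons_self, by rw [he]⟩
        · exact Or.inl hd
      · exact Or.inr ⟨row, List.mem_cons_of_mem _ hrow, hval⟩

lemma pvInsert_len_le (d : PySem.Dict String (List String)) (k : String) (v : List String) :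
    d.items.length ≤ (d.insert k v).items.length := by
  rw [PySem.Dict.items_insert]
  split <;> simp

lemma pvBuild_len (table : List String) :
    ∀ (d : PySem.Dict String (List String)),
      d.items.length ≤ (table.foldl pvInsertRow d).items.length := by
  induction table with
  | nil => intro d; exact le_refl _
  | cons r t ih =>
      intro d
      exact le_trans (pvInsert_len_le d ((pvSplitRow r).headD "") (pvSplitRow r).tail) (ih (pvInsertRow d r))

lemma pvBuild_ne_nil (table : List String) (h : table ≠ []) :
    (table.foldl pvInsertRow (PySem.Dict.empty : PySem.Dict String (List String))).items ≠ [] := by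
  obtain ⟨r, t, rfl⟩ := List.exists_cons_of_ne_nil h
  intro hnil
  have h1 : (pvInsertRow (PySem.Dict.empty : PySem.Dict String (List String)) r).items.length = 1 := by
    show ((PySem.Dict.empty.insert ((pvSplitRow r).headD "") (pvSplitRow r).tail)).items.length = 1
    rw [PySem.Dict.items_insert]
    simp [PySem.Dict.empty]
  have h2 := pvBuild_len t (pvInsertRow PySem.Dict.empty r)
  rw [List.foldl_cons, h1] at *
  rw [hnil] at h2
  simp at h2

-- turn a sum of 'if p then f else 0' into a sum over the filtered list
lemma pvSum_map_filter {α : Type} (xs : List α) (p : α → Bool) (f : α → Int) :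
    ((xs.filter p).map f).sum = (xs.map (fun x => if p x then f x else 0)).sum := by
  induction xs with
  | nil => rfl
  | cons x t ih =>
      by_cases hx : p x <;> simp [hx, ih]

-- A's per-entry factor: 5 minus the first index of k in L (0 when k is not in L)
def pvFa (L : List String) (k : String) : Int :=
  if k ∈ L then 5 - (((PySem.List.index? L k).getD 0 : Nat) : Int) else 0

-- shift lemma: A's enumerate-indexed sum from start s equals the zip sum over preference.drop s
lemma pvSum_shift (L : List String) (preference : List Int) :
    ∀ (langs : List String) (s : Nat),
      (∀ lang ∈ langs.drop (preference.length - s), lang ∉ L) →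
      ((PySem.List.enumerate langs (s : Int)).map (fun il =>
          if il.2 ∈ L then
            (5 - (((PySem.List.index? L il.2).getD 0 : Nat) : Int)) * PySem.List.pyGetD preference il.1 0
          else 0)).sum
      = ((langs.zip (preference.drop s)).map (fun lp =>
          if lp.1 ∈ L then (5 - (((PySem.List.index? L lp.1).getD 0 : Nat) : Int)) * lp.2 else 0)).sum := by
  intro langs
  induction langs with
  | nil => intro s h; simp [PySem.List.enumerate_nil]
  | cons l ls ih =>
      intro s h
      rw [PySem.List.enumerate_cons]
      by_cases hs : s < preference.length
      · have hdrop : preference.drop s = preference[s] :: preference.drop (s + 1) :=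
          List.drop_eq_getElem_cons hs
        have hget : PySem.List.pyGetD preference (s : Int) 0 = preference[s] := by
          rw [PySem.List.pyGetD_natCast]
          exact List.getD_eq_getElem preference 0 hs
        have hcast : ((s : Int) + 1) = ((s + 1 : Nat) : Int) := by push_cast; ring
        have htail : ∀ lang ∈ ls.drop (preference.length - (s + 1)), lang ∉ L := by
          intro lang hmem
          refine h lang ?_
          have hlen : preference.length - s = (preference.length - (s + 1)) + 1 := by omega
          rw [hlen, List.drop_succ_cons]
          exact hmem
        rw [hdrop]
        simp only [List.zip_cons_cons, List.map_cons, List.sum_cons, hcast, ih (s + 1) htail, hget]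
      · have hdrop : preference.drop s = [] := List.drop_eq_nil_of_le (by omega)
        have hall : ∀ lang ∈ (l :: ls), lang ∉ L := by
          have : preference.length - s = 0 := by omega
          simpa [this] using h
        have hl : l ∉ L := hall l List.mem_cons_self
        have hcast : ((s : Int) + 1) = ((s + 1 : Nat) : Int) := by push_cast; ring
        have htail : ∀ lang ∈ ls.drop (preference.length - (s + 1)), lang ∉ L := by
          intro lang hmem
          exact hall lang (List.mem_cons_of_mem _ (List.mem_of_mem_drop hmem))
        have hdrop1 : preference.drop (s + 1) = [] := List.drop_eq_nil_of_le (by omega)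
        rw [hdrop]
        simp only [List.zip_nil_right, List.map_nil, List.sum_nil, List.map_cons, List.sum_cons,
          hcast, ih (s + 1) htail, hdrop1, List.zip_nil_right, hl]
        simp

-- A's scoring loop as a sum over zip(languages, preference) weighted by pvFa
lemma pvPointA_eq_zipsum (languages : List String) (preference : List Int) (L : List String)
    (h : ∀ lang ∈ languages.drop preference.length, lang ∉ L) :
    pvPointA languages preference L
      = ((languages.zip preference).map (fun lp => pvFa L lp.1 * lp.2)).sum := by
  unfold pvPointA
  have hA : (PySem.List.enumerate languages).foldl (fun point il =>
      if il.2 ∈ L then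
        point + (5 - (((PySem.List.index? L il.2).getD 0 : Nat) : Int)) * PySem.List.pyGetD preference il.1 0
      else point) 0
      = ((PySem.List.enumerate languages).map (fun il =>
          if il.2 ∈ L then
            (5 - (((PySem.List.index? L il.2).getD 0 : Nat) : Int)) * PySem.List.pyGetD preference il.1 0
          else 0)).sum := by
    rw [PySem.List.foldl_congr_mem _ _
      (fun point il => point + (if il.2 ∈ L then
        (5 - (((PySem.List.index? L il.2).getD 0 : Nat) : Int)) * PySem.List.pyGetD preference il.1 0
        else 0)) 0 (by intro acc x _; by_cases hx : x.2 ∈ L <;> simp [hx])]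
    rw [PySem.List.foldl_add]
    simp
  rw [hA]
  have := pvSum_shift L preference languages 0 (by simpa using h)
  simp only [Nat.cast_zero, List.drop_zero] at this
  rw [this]
  apply congrArg
  apply List.map_congr_left
  intro lp _
  by_cases hx : lp.1 ∈ L <;> simp [pvFa, hx]

-- lookup in B's aggregated preference dict: the sum of the weights of all zip pairs with that key
lemma pvPref_getD (P : List (String × Int)) :
    ∀ (d : PySem.Dict String Int) (k : String),
      (P.foldl (fun d lp => d.insert lp.1 (d.getD lp.1 0 + lp.2)) d).getD k 0
      = d.getD k 0 + ((P.filter (fun lp => lp.1 == k)).map Prod.snd).sum := by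
  induction P with
  | nil => intro d k; simp
  | cons lp t ih =>
      intro d k
      rw [List.foldl_cons, ih]
      by_cases hk : lp.1 = k
      · subst hk
        simp [PySem.Dict.getD_insert_self]
        ring
      · have hne : ¬ (k = lp.1) := fun h => hk h.symm
        have : (lp.1 == k) = false := by simpa using hk
        simp [PySem.Dict.getD_insert, hne, this]

-- B's fold, characterised: total plus the sum over first occurrences (jl.1 = index of jl.2)
lemma pvB_fold (pref : PySem.Dict String Int) :
    ∀ (rest : List String) (s : Int) (seen : PySem.Set String) (total : Int),
      ((PySem.List.enumerate rest s).foldl (pvScoreStep pref) (seen, total)).2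
      = total + ((PySem.List.enumerate rest s).map (fun jl =>
          if jl.2 ∉ seen ∧ jl.1 = s + (((PySem.List.index? rest jl.2).getD 0 : Nat) : Int)
          then (5 - jl.1) * pref.getD jl.2 0 else 0)).sum := by
  intro rest
  induction rest with
  | nil => intro s seen total; simp [PySem.List.enumerate_nil]
  | cons x r ih =>
      intro s seen total
      rw [PySem.List.enumerate_cons, List.foldl_cons, List.map_cons, List.sum_cons]
      by_cases hx : x ∈ seen
      · have hstep : pvScoreStep pref (seen, total) (s, x) = (seen, total) := by
          simp [pvScoreStep, hx]
        rw [hstep, ih (s+1) seen total]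
        have hhead : (if x ∉ seen ∧ s = s + (((PySem.List.index? (x :: r) x).getD 0 : Nat) : Int)
            then (5 - s) * pref.getD x 0 else 0) = 0 := by
          simp [hx]
        rw [hhead]
        have hmap : ∀ jl ∈ PySem.List.enumerate r (s+1),
            (if jl.2 ∉ seen ∧ jl.1 = (s+1) + (((PySem.List.index? r jl.2).getD 0 : Nat) : Int)
              then (5 - jl.1) * pref.getD jl.2 0 else 0)
            = (if jl.2 ∉ seen ∧ jl.1 = s + (((PySem.List.index? (x :: r) jl.2).getD 0 : Nat) : Int)
              then (5 - jl.1) * pref.getD jl.2 0 else 0) := by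
          intro jl hjl
          obtain ⟨k, hk, rfl⟩ := (PySem.List.mem_enumerate_iff r (s+1) jl).mp hjl
          by_cases hex : r[k] = x
          · simp [hex, hx]
          · have hmem : r[k] ∈ r := List.getElem_mem hk
            obtain ⟨m, hm⟩ := Option.isSome_iff_exists.mp
              ((PySem.List.index?_isSome_iff r r[k]).mpr hmem)
            rw [PySem.List.index?_cons_of_ne r (Ne.symm hex), hm]
            simp only [Option.map_some, Option.getD_some]
            have hc : (s + 1) + (m : Int) = s + ((m + 1 : Nat) : Int) := by push_cast; ring
            rw [hc]
        rw [List.map_congr_left hmap]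
        omega
      · have hstep : pvScoreStep pref (seen, total) (s, x)
            = (PySem.Set.add seen x, total + (5 - s) * pref.getD x 0) := by
          simp [pvScoreStep, hx]
        rw [hstep, ih (s+1) (PySem.Set.add seen x) (total + (5 - s) * pref.getD x 0)]
        have hhead : (if x ∉ seen ∧ s = s + (((PySem.List.index? (x :: r) x).getD 0 : Nat) : Int)
            then (5 - s) * pref.getD x 0 else 0) = (5 - s) * pref.getD x 0 := by
          rw [PySem.List.index?_cons_self]
          simp [hx]
        rw [hhead]
        have hmap : ∀ jl ∈ PySem.List.enumerate r (s+1),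
            (if jl.2 ∉ PySem.Set.add seen x ∧ jl.1 = (s+1) + (((PySem.List.index? r jl.2).getD 0 : Nat) : Int)
              then (5 - jl.1) * pref.getD jl.2 0 else 0)
            = (if jl.2 ∉ seen ∧ jl.1 = s + (((PySem.List.index? (x :: r) jl.2).getD 0 : Nat) : Int)
              then (5 - jl.1) * pref.getD jl.2 0 else 0) := by
          intro jl hjl
          obtain ⟨k, hk, rfl⟩ := (PySem.List.mem_enumerate_iff r (s+1) jl).mp hjl
          by_cases hex : r[k] = x
          · have h1 : ((s+1+(k:Int)), r[k]).2 ∈ PySem.Set.add seen x := by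
              rw [PySem.Set.mem_add]; exact Or.inr hex
            have h2 : ¬ ((s+1+(k:Int)) = s + (((PySem.List.index? (x :: r) r[k]).getD 0 : Nat) : Int)) := by
              rw [hex, PySem.List.index?_cons_self]
              simp
              omega
            simp only [h1, h2]
            simp
          · have hmemadd : ((s+1+(k:Int)), r[k]).2 ∈ PySem.Set.add seen x ↔ r[k] ∈ seen := by
              rw [PySem.Set.mem_add]
              simp [hex]
            have hmem : r[k] ∈ r := List.getElem_mem hk
            obtain ⟨m, hm⟩ := Option.isSome_iff_exists.mp
              ((PySem.List.index?_isSome_iff r r[k]).mpr hmem)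
            rw [PySem.List.index?_cons_of_ne r (Ne.symm hex), hm]
            simp only [Option.map_some, Option.getD_some, hmemadd]
            have hc : (s + 1) + (m : Int) = s + ((m + 1 : Nat) : Int) := by push_cast; ring
            rw [hc]
        rw [List.map_congr_left hmap]
        omega

-- the first occurrences of L, in order: one entry per distinct element
def pvFirsts (L : List String) : List String :=
  ((PySem.List.enumerate L).filter
    (fun jl => decide (jl.1 = (((PySem.List.index? L jl.2).getD 0 : Nat) : Int)))).map (·.2)

lemma pvEnum_nodup (L : List String) (s : Int) : (PySem.List.enumerate L s).Nodup :=
  (PySem.List.pairwise_lt_enumerate L s).imp (fun h => by intro he; rw [he] at h; exact lt_irrefl _ h)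

lemma pvFirsts_nodup (L : List String) : (pvFirsts L).Nodup := by
  apply List.Nodup.map_on
  · intro x hx y hy hxy
    have hx' := List.mem_filter.mp hx
    have hy' := List.mem_filter.mp hy
    have h1 : x.1 = (((PySem.List.index? L x.2).getD 0 : Nat) : Int) := by
      simpa using hx'.2
    have h2 : y.1 = (((PySem.List.index? L y.2).getD 0 : Nat) : Int) := by
      simpa using hy'.2
    have : x.1 = y.1 := by rw [h1, h2, hxy]
    exact Prod.ext this hxy
  · exact (pvEnum_nodup L 0).filter _

lemma pvFirsts_mem (L : List String) (k : String) : k ∈ pvFirsts L ↔ k ∈ L := by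
  constructor
  · intro hk
    obtain ⟨jl, hjl, rfl⟩ := List.mem_map.mp hk
    obtain ⟨m, hm, rfl⟩ := (PySem.List.mem_enumerate_iff L 0 jl).mp (List.mem_filter.mp hjl).1
    exact List.getElem_mem hm
  · intro hk
    obtain ⟨m, hm⟩ := Option.isSome_iff_exists.mp ((PySem.List.index?_isSome_iff L k).mpr hk)
    obtain ⟨hlt, hget, _⟩ := PySem.List.getElem_of_index?_eq_some hm
    refine List.mem_map.mpr ⟨((0 : Int) + (m : Nat), L[m]), List.mem_filter.mpr ⟨?_, ?_⟩, hget⟩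
    · exact (PySem.List.mem_enumerate_iff L 0 _).mpr ⟨m, hlt, rfl⟩
    · have hm' := hm
      rw [PySem.List.index?_eq_idxOf?] at hm'
      simp [hget, hm']

-- B's score as a sum over the distinct elements of L
lemma pvPointB_eq (pref : PySem.Dict String Int) (L : List String) :
    pvPointB pref L = ((pvFirsts L).map (fun k => pvFa L k * pref.getD k 0)).sum := by
  unfold pvPointB
  rw [pvB_fold pref L 0 PySem.Set.empty 0, zero_add]
  rw [List.map_congr_left (l := PySem.List.enumerate L)
    (g := fun jl => if (decide (jl.1 = (((PySem.List.index? L jl.2).getD 0 : Nat) : Int)) : Bool)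
        then (5 - jl.1) * pref.getD jl.2 0 else 0)
    (by intro jl _; simp [PySem.Set.empty])]
  rw [← pvSum_map_filter]
  unfold pvFirsts
  rw [List.map_map]
  apply congrArg
  apply List.map_congr_left
  intro jl hjl
  have hmem := List.mem_filter.mp hjl
  have hcond : jl.1 = (((PySem.List.index? L jl.2).getD 0 : Nat) : Int) := by
    simpa using hmem.2
  obtain ⟨k, hk, rfl⟩ := (PySem.List.mem_enumerate_iff L 0 jl).mp hmem.1
  have hin : (((0:Int) + (k:Nat), L[k]) : Int × String).2 ∈ L := List.getElem_mem hk
  simp only [Function.comp]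
  rw [pvFa]
  simp only [hin, if_true]
  rw [← hcond]

-- Nodup sum of a one-point function
lemma pvSumDelta (S : List String) (a : String) (c : String → Int) (h : S.Nodup) :
    (S.map (fun k => if k = a then c k else 0)).sum = if a ∈ S then c a else 0 := by
  induction S with
  | nil => simp
  | cons x t ih =>
      rw [List.map_cons, List.sum_cons, ih (List.Nodup.of_cons h)]
      by_cases hx : x = a
      · subst hx
        have : x ∉ t := (List.nodup_cons.mp h).1
        simp [this]
      · simp [hx, Ne.symm hx]

-- grouping: a keyed sum over pairs equals the sum, over any Nodup list covering the relevant keys,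
-- of the factor times the total weight of that key
lemma pvGroup (f : String → Int) (S : List String) (hS : S.Nodup) :
    ∀ (P : List (String × Int)), (∀ lp ∈ P, lp.1 ∉ S → f lp.1 = 0) →
      (P.map (fun lp => f lp.1 * lp.2)).sum
      = (S.map (fun k => f k * ((P.filter (fun lp => lp.1 == k)).map Prod.snd).sum)).sum := by
  intro P
  induction P with
  | nil =>
      intro _
      simp
  | cons lp t ih =>
      intro h0
      rw [List.map_cons, List.sum_cons, ih (fun q hq => h0 q (List.mem_cons_of_mem _ hq))]
      have hsplit : ∀ k ∈ S,
          f k * (((lp :: t).filter (fun q => q.1 == k)).map Prod.snd).sum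
          = f k * ((t.filter (fun q => q.1 == k)).map Prod.snd).sum
            + (if k = lp.1 then f k * lp.2 else 0) := by
        intro k _
        by_cases hk : lp.1 = k
        · subst hk
          rw [List.filter_cons]
          simp
          ring
        · rw [List.filter_cons]
          simp [hk]
          intro h
          exact absurd h.symm hk
      rw [List.map_congr_left hsplit]
      rw [List.sum_map_add]
      rw [pvSumDelta S lp.1 (fun k => f k * lp.2) hS]
      by_cases hmem : lp.1 ∈ S
      · simp [hmem]
        ring
      · rw [h0 lp (List.mem_cons_self) hmem]
        simp [hmem]

-- the scoring equivalence
lemma pvPoint_eq (languages : List String) (preference : List Int) (L : List String)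
    (h : ∀ lang ∈ languages.drop preference.length, lang ∉ L) :
    pvPointA languages preference L = pvPointB (pvPrefDict languages preference) L := by
  rw [pvPointA_eq_zipsum languages preference L h, pvPointB_eq]
  rw [pvGroup (pvFa L) (pvFirsts L) (pvFirsts_nodup L) (languages.zip preference)
      (by intro lp _ hnot
          have hnl : lp.1 ∉ L := fun hm => hnot ((pvFirsts_mem L lp.1).mpr hm)
          simp [pvFa, hnl])]
  apply congrArg
  apply List.map_congr_left
  intro k _
  have := pvPref_getD (languages.zip preference) PySem.Dict.empty k
  simp [PySem.Dict.getD_empty] at this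
  rw [pvPrefDict, this]

-- bridges: each port rewritten as map-then-fold over the parsed table
lemma pvSolutionA_eq (table : List String) (languages : List String) (preference : List Int) :
    solution table languages preference =
      (PySem.List.sorted ((((table.foldl pvInsertRow PySem.Dict.empty).items.map
          (fun cl => (cl.1, pvPointA languages preference cl.2))).foldl pvStepA
          ((none : Option Int), ([] : List String))).2) (fun x => x) false).headD "" := by
  unfold solution
  rw [List.foldl_map]
  rfl

lemma pvSolutionB_eq (table : List String) (languages : List String) (preference : List Int) :
    solution_alt table languages preference =
      (((((table.foldl pvInsertRow PySem.Dict.empty).items.map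
          (fun cl => (cl.1, pvPointB (pvPrefDict languages preference) cl.2))).foldl pvStepM none)).getD ("", 0)).1 := by
  unfold solution_alt
  rw [← pvMin2_eq_foldl]

-- ===== VERDICT (by name: the statement is the Claim_ definition above) =====
theorem solution_spec : Claim_equal_solution := by
  intro table languages preference _ hpre
  obtain ⟨htab, hlang⟩ := hpre
  show solution table languages preference = solution_alt table languages preference
  have hvals : ∀ p ∈ (table.foldl pvInsertRow (PySem.Dict.empty : PySem.Dict String (List String))).items,
      ∀ lang ∈ languages.drop preference.length, lang ∉ p.2 := by
    intro p hp lang hmem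
    rcases pvBuild_vals table PySem.Dict.empty p hp with hin | ⟨row, hrow, hval⟩
    · exact absurd hin List.not_mem_nil
    · rw [hval]; exact hlang lang hmem row hrow
  have hmap : (table.foldl pvInsertRow (PySem.Dict.empty : PySem.Dict String (List String))).items.map
        (fun cl => (cl.1, pvPointA languages preference cl.2))
      = (table.foldl pvInsertRow (PySem.Dict.empty : PySem.Dict String (List String))).items.map
        (fun cl => (cl.1, pvPointB (pvPrefDict languages preference) cl.2)) := by
    apply List.map_congr_left
    intro cl hcl
    exact congrArg _ (pvPoint_eq languages preference cl.2 (hvals cl hcl))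
  rw [pvSolutionA_eq, pvSolutionB_eq, hmap]
  exact pvSelection _ (by simpa using pvBuild_ne_nil table htab)
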